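-- pv_equiv track=rewrite | github.com/promptdriven/pdd | experiments/grounding/results/llm_invoke_opus_generations/llm_invoke_grounded_run4.py | _smart_unescape_code
-- ===== SOURCE A (Python) =====
-- from typing import Any, Dict, List, Optional, Tuple, Type, Union
--
-- def _smart_unescape_code(code: str) -> str:
--     if "\\n" not in code:
--         return code
--     has_actual_newlines = "\n" in code
--     if has_actual_newlines:
--         return code
--
--     result: List[str] = []
--     i = 0
--     in_string = False
--     string_char: Optional[str] = None
--     placeholder = "\x00NEWLINE_ESCAPE\x00"
--
--     while i < len(code):
--         if i + 1 < len(code) and code[i] == "\\":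
--             next_char = code[i + 1]
--             if in_string and next_char == "n":
--                 result.append(placeholder)
--                 i += 2
--                 continue
--
--         if not in_string:
--             if i + 2 < len(code) and code[i : i + 3] in ('"""', "'''"):
--                 in_string = True
--                 string_char = code[i : i + 3]
--                 result.append(string_char)
--                 i += 3
--                 continue
--             if code[i] in ('"', "'"):
--                 in_string = True
--                 string_char = code[i]
--                 result.append(code[i])
--                 i += 1
--                 continue
--         else:
--             if string_char and len(string_char) == 3:
--                 if code[i : i + 3] == string_char:
--                     in_string = False
--                     result.append(string_char)
--                     i += 3
--                     continue
--             elif string_char and code[i] == string_char: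
--                 in_string = False
--                 result.append(code[i])
--                 i += 1
--                 continue
--
--         result.append(code[i])
--         i += 1
--
--     intermediate = "".join(result)
--     intermediate = intermediate.replace("\\r\\n", "\r\n").replace("\\n", "\n").replace("\\t", "\t")
--     return intermediate.replace(placeholder, "\\n")
-- ===== SOURCE B (Python) =====
-- def _smart_unescape_code(code: str) -> str:
--     if "\\n" not in code or "\n" in code:
--         return code
--
--     # One pass: partition code into alternating segments — "code" text (with the
--     # quote delimiters attached) and string-literal bodies — then apply the
--     # replacements chunk-locally: full unescaping on code segments, only \t on
--     # string bodies (their \n / \r\n escapes are kept literal).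
--     parts = []            # list of (is_string_body, segment)
--     buf = []
--     in_string = False
--     quote = ""
--     i, n = 0, len(code)
--     while i < n:
--         if not in_string:
--             if code[i:i + 3] in ('"""', "'''"):
--                 quote = code[i:i + 3]
--             elif code[i] in ('"', "'"):
--                 quote = code[i]
--             else:
--                 buf.append(code[i])
--                 i += 1
--                 continue
--             buf.append(quote)
--             parts.append((False, "".join(buf)))
--             buf = []
--             in_string = True
--             i += len(quote)
--         else:
--             if code[i] == "\\" and i + 1 < n and code[i + 1] == "n":
--                 buf.append("\\n")
--                 i += 2
--             elif code[i:i + len(quote)] == quote: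
--                 parts.append((True, "".join(buf)))
--                 buf = [quote]
--                 in_string = False
--                 i += len(quote)
--             else:
--                 buf.append(code[i])
--                 i += 1
--     parts.append((in_string, "".join(buf)))
--
--     out = []
--     for is_string_body, seg in parts:
--         if is_string_body:
--             out.append(seg.replace("\\t", "\t"))
--         else:
--             out.append(seg.replace("\\r\\n", "\r\n").replace("\\n", "\n").replace("\\t", "\t"))
--     return "".join(out)
-- ===== Notes on version B (the rewrite author's own statement) =====
-- stated objective: alternative
-- what changed: B replaces A's placeholder round-trip (rewrite in-string \n escapes to a sentinel, run global str.replace passes over the whole string, then restore the sentinel) by a single segmentation pass that splits the code into alternating code/string-body chunks and applies the replacements chunk-locally (full unescape on code chunks, only \t inside string bodies), with no placeholder at all.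
import Mathlib
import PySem

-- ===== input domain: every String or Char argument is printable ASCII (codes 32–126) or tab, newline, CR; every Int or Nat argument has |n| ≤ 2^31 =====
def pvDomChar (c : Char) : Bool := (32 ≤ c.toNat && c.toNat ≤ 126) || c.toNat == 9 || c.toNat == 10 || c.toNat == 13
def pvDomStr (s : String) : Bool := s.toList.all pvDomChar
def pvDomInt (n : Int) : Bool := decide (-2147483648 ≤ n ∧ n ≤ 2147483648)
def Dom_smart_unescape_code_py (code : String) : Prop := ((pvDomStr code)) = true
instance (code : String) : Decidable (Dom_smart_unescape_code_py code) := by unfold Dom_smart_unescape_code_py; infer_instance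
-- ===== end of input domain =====

set_option maxRecDepth 8192


-- B replaces A's placeholder round-trip (protect in-string \n, run global str.replace passes,
-- restore) by one segmentation pass into code/string-body chunks with chunk-local replacements.

-- ===== PORT A =====
-- the placeholder "\x00NEWLINE_ESCAPE\x00"
def pvPH : List Char := ['\x00','N','E','W','L','I','N','E','_','E','S','C','A','P','E','\x00']

-- A's while loop over i, transcribed on the remaining suffix of the code (i += k  ↦  drop k);
-- emits the strings A appends to `result`, in order.
def scanA : List Char → Bool → List Char → List (List Char)
  | [], _, _ => []
  | c :: t, in_string, string_char =>
    if t ≠ [] ∧ c = '\\' ∧ (in_string = true ∧ t[0]? = some 'n') then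
      pvPH :: scanA t.tail in_string string_char
    else if in_string = false then
      if 2 < (c :: t).length ∧ ((c :: t).take 3 = ['"','"','"'] ∨ (c :: t).take 3 = ['\'','\'','\'']) then
        (c :: t).take 3 :: scanA ((c :: t).drop 3) true ((c :: t).take 3)
      else if c = '"' ∨ c = '\'' then
        [c] :: scanA t true [c]
      else
        [c] :: scanA t in_string string_char
    else
      if string_char ≠ [] ∧ string_char.length = 3 then
        if (c :: t).take 3 = string_char then
          string_char :: scanA ((c :: t).drop 3) false string_char
        else
          [c] :: scanA t in_string string_char
      else if string_char ≠ [] ∧ [c] = string_char then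
        [c] :: scanA t false string_char
      else
        [c] :: scanA t in_string string_char
termination_by l _ _ => l.length
decreasing_by all_goals (first | (simp; omega) | simp)

def smart_unescape_code_py (code : String) : String :=
  if ¬ (PySem.Chars.isIn ['\\', 'n'] code.toList = true) then code
  else if PySem.Chars.isIn ['\n'] code.toList = true then code
  else
    String.ofList (PySem.Chars.replace (PySem.Chars.replace (PySem.Chars.replace
      (PySem.Chars.replace (PySem.Chars.join [] (scanA code.toList false []))
        ['\\','r','\\','n'] ['\r','\n']) ['\\','n'] ['\n']) ['\\','t'] ['\t']) pvPH ['\\','n'])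

-- ===== PORT B =====
-- B's single pass: partition into alternating (code-with-delimiters, string-body) segments.
def scanB : List Char → Bool → List Char → List Char → List (Bool × List Char)
  | [], in_string, _, buf => [(in_string, buf)]
  | c :: t, in_string, quote, buf =>
    if in_string = false then
      if (c :: t).take 3 = ['"','"','"'] ∨ (c :: t).take 3 = ['\'','\'','\''] then
        (false, buf ++ (c :: t).take 3) :: scanB ((c :: t).drop 3) true ((c :: t).take 3) []
      else if c = '"' ∨ c = '\'' then
        (false, buf ++ [c]) :: scanB t true [c] []
      else
        scanB t in_string quote (buf ++ [c])
    else
      if c = '\\' ∧ t ≠ [] ∧ t[0]? = some 'n' then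
        scanB t.tail in_string quote (buf ++ ['\\', 'n'])
      else if h : quote ≠ [] ∧ (c :: t).take quote.length = quote then
        (true, buf) :: scanB ((c :: t).drop quote.length) false quote quote
      else
        scanB t in_string quote (buf ++ [c])
termination_by l _ _ _ => l.length
decreasing_by
  all_goals first
    | (simp; omega)
    | (cases quote with
       | nil => exact absurd rfl h.1
       | cons q qs => simp)
    | simp

-- chunk-local full unescape for code segments
def chain3 (s : List Char) : List Char :=
  PySem.Chars.replace (PySem.Chars.replace (PySem.Chars.replace s
    ['\\','r','\\','n'] ['\r','\n']) ['\\','n'] ['\n']) ['\\','t'] ['\t']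

def smart_unescape_code_py_alt (code : String) : String :=
  if ¬ (PySem.Chars.isIn ['\\', 'n'] code.toList = true) ∨ PySem.Chars.isIn ['\n'] code.toList = true then
    code
  else
    String.ofList (((scanB code.toList false [] []).map
      (fun p => if p.1 then PySem.Chars.replace p.2 ['\\','t'] ['\t'] else chain3 p.2)).flatten)

-- ===== PRECONDITION & SPEC =====
def Spec_smart_unescape_code_py (code : String) (out : String) : Prop := out = smart_unescape_code_py_alt code
instance (code : String) (out : String) : Decidable (Spec_smart_unescape_code_py code out) := by unfold Spec_smart_unescape_code_py; infer_instance

-- ===== CLAIM (what is proved, stated in full; the proofs are below) =====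
def Claim_equal_smart_unescape_code_py : Prop := ∀ (code : String), Dom_smart_unescape_code_py code → Spec_smart_unescape_code_py code (smart_unescape_code_py code)

-- ===== LEMMAS AND PROOFS =====

-- Structural mirror of Python's left-to-right non-overlapping str.replace (for old ≠ []).
def repl (old new : List Char) : List Char → List Char
  | [] => []
  | c :: t =>
    if h : old ≠ [] ∧ old.isPrefixOf (c :: t) then
      new ++ repl old new ((c :: t).drop old.length)
    else
      c :: repl old new t
termination_by l => l.length
decreasing_by
  all_goals first
    | (cases old with
       | nil => exact absurd rfl h.1
       | cons o os => simp)
    | simp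

lemma repl_nil (old new : List Char) : repl old new [] = [] := by simp [repl]

lemma repl_cons_pos (old new : List Char) (c : Char) (t : List Char)
    (h1 : old ≠ []) (h2 : old <+: (c :: t)) :
    repl old new (c :: t) = new ++ repl old new ((c :: t).drop old.length) := by
  rw [repl, dif_pos ⟨h1, List.isPrefixOf_iff_prefix.mpr h2⟩]

lemma repl_cons_neg (old new : List Char) (c : Char) (t : List Char)
    (h : ¬ old <+: (c :: t)) :
    repl old new (c :: t) = c :: repl old new t := by
  rw [repl, dif_neg (fun hh => h (List.isPrefixOf_iff_prefix.mp hh.2))]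

lemma repl_prefix (old new X : List Char) (hold : old ≠ []) :
    repl old new (old ++ X) = new ++ repl old new X := by
  cases old with
  | nil => exact absurd rfl hold
  | cons o os =>
    rw [List.cons_append, repl_cons_pos _ _ _ _ hold (by rw [← List.cons_append]; exact List.prefix_append _ _)]
    simp [List.drop_append]

lemma repl_cons_of_head_ne (o : Char) (os new : List Char) (c : Char) (t : List Char)
    (h : c ≠ o) : repl (o :: os) new (c :: t) = c :: repl (o :: os) new t := by
  refine repl_cons_neg _ _ _ _ (fun hp => ?_)
  exact h (List.cons_prefix_cons.mp hp).1.symm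

lemma repl_cons_not_mem (old new : List Char) (c : Char) (t : List Char)
    (h : c ∉ old) : repl old new (c :: t) = c :: repl old new t := by
  cases old with
  | nil => rw [repl, dif_neg (by simp)]
  | cons o os => exact repl_cons_of_head_ne o os new c t (fun hh => h (hh ▸ List.mem_cons_self))

lemma go_eq_repl (old new : List Char) (hold : old ≠ []) :
    ∀ fuel l acc, l.length ≤ fuel →
      PySem.Chars.replace.go old new fuel l acc = acc.reverse ++ repl old new l := by
  intro fuel
  induction fuel with
  | zero =>
    intro l acc hl
    have hnil : l = [] := by cases l <;> simp_all
    subst hnil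
    simp [PySem.Chars.replace.go, repl_nil]
  | succ n ih =>
    intro l acc hl
    cases l with
    | nil => simp [PySem.Chars.replace.go, repl_nil]
    | cons c t =>
      rw [PySem.Chars.replace.go]
      by_cases hp : old.isPrefixOf (c :: t)
      · rw [if_pos hp]
        have hlen : 1 ≤ old.length := by
          cases old with
          | nil => exact absurd rfl hold
          | cons _ _ => simp
        rw [ih _ _ (by simp at hl ⊢; omega)]
        rw [repl_cons_pos _ _ _ _ hold (List.isPrefixOf_iff_prefix.mp hp)]
        simp
      · rw [if_neg hp]
        rw [ih _ _ (by simp at hl ⊢; omega)]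
        rw [repl_cons_neg _ _ _ _ (fun hh => hp (List.isPrefixOf_iff_prefix.mpr hh))]
        simp

lemma replace_eq_repl (s old new : List Char) (h : old ≠ []) :
    PySem.Chars.replace s old new = repl old new s := by
  rw [PySem.Chars.replace, if_neg (by simp [h])]
  rw [go_eq_repl old new h s.length s [] (le_refl _)]
  simp

lemma repl_not_occ (old new : List Char) :
    ∀ l, (∀ j, ¬ old <+: l.drop j) → repl old new l = l := by
  intro l
  induction l with
  | nil => intro _; simp [repl_nil]
  | cons c t ih =>
    intro h
    rw [repl_cons_neg _ _ _ _ (h 0)]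
    rw [ih (fun j => h (j + 1))]

lemma repl_not_mem (old new : List Char) (l : List Char) (c : Char)
    (hc : c ∈ old) (hl : c ∉ l) : repl old new l = l := by
  refine repl_not_occ old new l (fun j hp => ?_)
  exact hl (List.drop_subset j l (hp.subset hc))

lemma getLast_mem_of_ne (l : List Char) (hl : l ≠ []) :
    ∃ x, l.getLast? = some x ∧ x ∈ l := by
  cases hx : l.getLast? with
  | none => exact absurd (List.getLast?_eq_none_iff.mp hx) hl
  | some x =>
    refine ⟨x, rfl, ?_⟩
    obtain ⟨ys, hy⟩ := List.getLast?_eq_some_iff.mp hx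
    rw [hy]
    simp

lemma mem_repl (old new : List Char) (l : List Char) :
    ∀ d ∈ repl old new l, d ∈ l ∨ d ∈ new := by
  induction l using repl.induct old with
  | case1 => intro d hd; rw [repl_nil] at hd; cases hd
  | case2 c t h ih =>
    intro d hd
    rw [repl_cons_pos _ _ _ _ h.1 (List.isPrefixOf_iff_prefix.mp h.2)] at hd
    rcases List.mem_append.mp hd with h1 | h1
    · exact Or.inr h1
    · rcases ih d h1 with h2 | h2
      · exact Or.inl (List.mem_of_mem_drop h2)
      · exact Or.inr h2
  | case3 c t h ih =>
    intro d hd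
    rw [repl, dif_neg h] at hd
    rcases List.mem_cons.mp hd with h1 | h1
    · exact Or.inl (h1 ▸ List.mem_cons_self)
    · rcases ih d h1 with h2 | h2
      · exact Or.inl (List.mem_cons_of_mem _ h2)
      · exact Or.inr h2

lemma repl_append_head (old new : List Char) (hold : old ≠ []) (a b : List Char)
    (hb : ∀ c, b.head? = some c → c ∉ old) :
    repl old new (a ++ b) = repl old new a ++ repl old new b := by
  induction a using repl.induct old with
  | case1 => simp [repl_nil]
  | case2 c t h ih =>
    have hpa : old <+: (c :: t) := List.isPrefixOf_iff_prefix.mp h.2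
    have hp : old <+: (c :: t) ++ b := hpa.trans (List.prefix_append _ _)
    have hlen : old.length ≤ (c :: t).length := hpa.length_le
    rw [show ((c :: t) ++ b) = c :: (t ++ b) by simp] at hp ⊢
    rw [repl_cons_pos _ _ _ _ hold hp, repl_cons_pos _ _ _ _ hold hpa]
    rw [show (c :: (t ++ b)) = (c :: t) ++ b by simp, List.drop_append_of_le_length hlen]
    rw [ih]
    simp
  | case3 c t h ih =>
    have hpa : ¬ old <+: (c :: t) := fun hp => h ⟨hold, List.isPrefixOf_iff_prefix.mpr hp⟩
    have hp : ¬ old <+: (c :: t) ++ b := by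
      intro hp
      by_cases hlen : old.length ≤ (c :: t).length
      · apply hpa
        rw [List.prefix_iff_eq_take] at hp ⊢
        rwa [List.take_append_of_le_length hlen] at hp
      · have hao : (c :: t) <+: old :=
          List.prefix_of_prefix_length_le (List.prefix_append _ _) hp (by omega)
        obtain ⟨r, hr⟩ := hao
        have hrb : r <+: b := by
          rw [← hr] at hp
          exact (List.prefix_append_right_inj (c :: t)).mp hp
        cases r with
        | nil =>
          apply hlen
          rw [← hr]
          simp
        | cons d r' =>
          obtain ⟨w, hw⟩ := hrb
          have hdb : b.head? = some d := by rw [← hw]; simp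
          exact hb d hdb (by rw [← hr]; exact List.mem_append_right _ List.mem_cons_self)
    rw [show ((c :: t) ++ b) = c :: (t ++ b) by simp]
    rw [repl_cons_neg _ _ _ _ (by rw [show (c :: (t ++ b)) = (c :: t) ++ b by simp]; exact hp)]
    rw [repl_cons_neg _ _ _ _ hpa, ih]
    simp

lemma repl_append_last (old new : List Char) (hold : old ≠ []) (a b : List Char)
    (ha : ∀ c, a.getLast? = some c → c ∉ old) :
    repl old new (a ++ b) = repl old new a ++ repl old new b := by
  induction a using repl.induct old with
  | case1 => simp [repl_nil]
  | case2 c t h ih =>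
    have hpa : old <+: (c :: t) := List.isPrefixOf_iff_prefix.mp h.2
    have hp : old <+: (c :: t) ++ b := hpa.trans (List.prefix_append _ _)
    have hlen : old.length ≤ (c :: t).length := hpa.length_le
    by_cases hdrop : (c :: t).drop old.length = []
    · exfalso
      have hlen2 : (c :: t).length ≤ old.length := by
        have h0 : ((c :: t).drop old.length).length = (c :: t).length - old.length :=
          List.length_drop
        rw [hdrop] at h0
        simp only [List.length_nil, List.length_cons] at h0 ⊢
        omega
      have heq : old = c :: t := hpa.eq_of_length (le_antisymm hlen hlen2)
      obtain ⟨x, hx, hmem⟩ := getLast_mem_of_ne (c :: t) (by simp)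
      exact ha x hx (heq ▸ hmem)
    · have hgl : (c :: t).getLast? = ((c :: t).drop old.length).getLast? := by
        conv_lhs => rw [← List.take_append_drop old.length (c :: t)]
        rw [List.getLast?_append]
        cases hx : ((c :: t).drop old.length).getLast? with
        | none => exact absurd (List.getLast?_eq_none_iff.mp hx) hdrop
        | some x => simp
      rw [show ((c :: t) ++ b) = c :: (t ++ b) by simp] at hp ⊢
      rw [repl_cons_pos _ _ _ _ hold hp, repl_cons_pos _ _ _ _ hold hpa]
      rw [show (c :: (t ++ b)) = (c :: t) ++ b by simp, List.drop_append_of_le_length hlen]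
      rw [ih (fun ch hch => ha ch (hgl ▸ hch))]
      simp
  | case3 c t h ih =>
    have hpa : ¬ old <+: (c :: t) := fun hp => h ⟨hold, List.isPrefixOf_iff_prefix.mpr hp⟩
    have hp : ¬ old <+: (c :: t) ++ b := by
      intro hp
      by_cases hlen : old.length ≤ (c :: t).length
      · apply hpa
        rw [List.prefix_iff_eq_take] at hp ⊢
        rwa [List.take_append_of_le_length hlen] at hp
      · have hao : (c :: t) <+: old :=
          List.prefix_of_prefix_length_le (List.prefix_append _ _) hp (by omega)
        obtain ⟨x, hx, hmem⟩ := getLast_mem_of_ne (c :: t) (by simp)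
        exact ha x hx (hao.subset hmem)
    have ha' : ∀ ch, t.getLast? = some ch → ch ∉ old := by
      intro ch hch
      cases t with
      | nil => simp at hch
      | cons d t' => exact ha ch (by rwa [List.getLast?_cons_cons])
    rw [show ((c :: t) ++ b) = c :: (t ++ b) by simp]
    rw [repl_cons_neg _ _ _ _ (by rw [show (c :: (t ++ b)) = (c :: t) ++ b by simp]; exact hp)]
    rw [repl_cons_neg _ _ _ _ hpa, ih ha']
    simp

lemma repl_append_pair (o1 o2 : Char) (new a b : List Char)
    (hab : ¬ (a.getLast? = some o1 ∧ b.head? = some o2)) :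
    repl [o1, o2] new (a ++ b) = repl [o1, o2] new a ++ repl [o1, o2] new b := by
  induction a using repl.induct [o1, o2] with
  | case1 => simp [repl_nil]
  | case2 c t h ih =>
    have hpa : [o1, o2] <+: (c :: t) := List.isPrefixOf_iff_prefix.mp h.2
    obtain ⟨hc, hpt⟩ := List.cons_prefix_cons.mp hpa
    cases t with
    | nil => simp [List.prefix_nil] at hpt
    | cons d t' =>
      obtain ⟨hd, -⟩ := List.cons_prefix_cons.mp hpt
      subst hc
      subst hd
      have hp : [o1, o2] <+: (o1 :: o2 :: t') ++ b := hpa.trans (List.prefix_append _ _)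
      rw [show ((o1 :: o2 :: t') ++ b) = o1 :: o2 :: (t' ++ b) by simp] at hp ⊢
      rw [repl_cons_pos _ _ _ _ (by simp) hp, repl_cons_pos _ _ _ _ (by simp) hpa]
      have ht' : ¬ (t'.getLast? = some o1 ∧ b.head? = some o2) := by
        intro ⟨h1, h2⟩
        cases t' with
        | nil => simp at h1
        | cons e t'' =>
          exact hab ⟨by rw [List.getLast?_cons_cons, List.getLast?_cons_cons]; exact h1, h2⟩
      have ihx := ih ht'
      rw [show List.drop ([o1, o2] : List Char).length (o1 :: o2 :: (t' ++ b)) = t' ++ b from rfl]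
      rw [show List.drop ([o1, o2] : List Char).length (o1 :: o2 :: t') = t' from rfl] at ihx ⊢
      rw [ihx]
      simp
  | case3 c t h ih =>
    have hpa : ¬ [o1, o2] <+: (c :: t) := fun hp => h ⟨by simp, List.isPrefixOf_iff_prefix.mpr hp⟩
    have hp : ¬ [o1, o2] <+: (c :: t) ++ b := by
      intro hp
      rw [show ((c :: t) ++ b) = c :: (t ++ b) by simp] at hp
      obtain ⟨hc, hpt⟩ := List.cons_prefix_cons.mp hp
      cases t with
      | nil =>
        obtain ⟨w, hw⟩ := hpt
        simp only [List.nil_append] at hw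
        exact hab ⟨by simp [hc], by rw [← hw]; rfl⟩
      | cons d t' =>
        obtain ⟨hd, -⟩ := List.cons_prefix_cons.mp hpt
        exact hpa (by rw [← hc, ← hd]; exact ⟨t', by simp⟩)
    have ht : ¬ (t.getLast? = some o1 ∧ b.head? = some o2) := by
      intro ⟨h1, h2⟩
      cases t with
      | nil => simp at h1
      | cons d t' => exact hab ⟨by rwa [List.getLast?_cons_cons], h2⟩
    rw [show ((c :: t) ++ b) = c :: (t ++ b) by simp]
    rw [repl_cons_neg _ _ _ _ (by rw [show (c :: (t ++ b)) = (c :: t) ++ b by simp]; exact hp)]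
    rw [repl_cons_neg _ _ _ _ hpa, ih ht]
    simp

lemma prefix_of_repl (old new : List Char) (hnew : new ≠ []) (t : List Char) :
    ∀ s, s ≠ [] → (∀ c ∈ s, c ∉ new) → s <+: repl old new t → s <+: t := by
  induction t using repl.induct old with
  | case1 =>
    intro s hs _ hp
    rw [repl_nil] at hp
    exact absurd (List.prefix_nil.mp hp) hs
  | case2 c t h ih =>
    intro s hs hsn hp
    exfalso
    rw [repl, dif_pos h] at hp
    cases s with
    | nil => exact hs rfl
    | cons sc s' =>
      cases new with
      | nil => exact hnew rfl
      | cons nc new' =>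
        have hcn : sc = nc := (List.cons_prefix_cons.mp (by simpa using hp)).1
        exact hsn sc List.mem_cons_self (hcn ▸ List.mem_cons_self)
  | case3 c t h ih =>
    intro s hs hsn hp
    rw [repl, dif_neg h] at hp
    cases s with
    | nil => exact absurd rfl hs
    | cons sc s' =>
      obtain ⟨hc, hps⟩ := List.cons_prefix_cons.mp hp
      subst hc
      cases s' with
      | nil => exact List.cons_prefix_cons.mpr ⟨rfl, List.nil_prefix⟩
      | cons e s'' =>
        exact List.cons_prefix_cons.mpr
          ⟨rfl, ih (e :: s'') (by simp) (fun ch hch => hsn ch (List.mem_cons_of_mem _ hch)) hps⟩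

lemma not_prefix_repl (old new : List Char) (hold : old ≠ []) (hnew : new ≠ [])
    (hdisj : ∀ c ∈ new, c ∉ old) (l : List Char) :
    ∀ j, ¬ old <+: (repl old new l).drop j := by
  induction l using repl.induct old with
  | case1 =>
    intro j hp
    rw [repl_nil] at hp
    simp only [List.drop_nil] at hp
    exact hold (List.prefix_nil.mp hp)
  | case2 c t h ih =>
    intro j hp
    rw [repl, dif_pos h] at hp
    by_cases hj : j < new.length
    · rw [List.drop_append_of_le_length (le_of_lt hj)] at hp
      have hne : new.drop j ≠ [] := by
        intro hx
        have := congrArg List.length hx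
        simp only [List.length_drop, List.length_nil] at this
        omega
      cases old with
      | nil => exact hold rfl
      | cons o os =>
        cases hdn : new.drop j with
        | nil => exact hne hdn
        | cons d rest =>
          rw [hdn] at hp
          have hod : o = d := (List.cons_prefix_cons.mp (by simpa using hp)).1
          refine hdisj d ?_ (hod ▸ List.mem_cons_self)
          exact List.drop_subset j new (hdn ▸ List.mem_cons_self)
    · rw [List.drop_append] at hp
      rw [List.drop_eq_nil_of_le (by omega)] at hp
      simp only [List.nil_append] at hp
      exact ih _ hp
  | case3 c t h ih =>
    intro j hp
    rw [repl, dif_neg h] at hp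
    cases j with
    | zero =>
      simp only [List.drop_zero] at hp
      cases old with
      | nil => exact hold rfl
      | cons o os =>
        obtain ⟨hoc, hos⟩ := List.cons_prefix_cons.mp hp
        cases os with
        | nil =>
          exact h ⟨by simp, List.isPrefixOf_iff_prefix.mpr (by rw [hoc]; simp)⟩
        | cons e os' =>
          have hsub : ∀ ch ∈ (e :: os'), ch ∉ new := by
            intro ch hch hchn
            exact hdisj ch hchn (List.mem_cons_of_mem _ hch)
          have : (e :: os') <+: t := prefix_of_repl (o :: e :: os') new hnew t (e :: os') (by simp) hsub hos
          exact h ⟨by simp, List.isPrefixOf_iff_prefix.mpr (by rw [hoc]; exact List.cons_prefix_cons.mpr ⟨rfl, this⟩)⟩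
    | succ j' =>
      simp only [List.drop_succ_cons] at hp
      exact ih j' hp

-- shorthand for the five replacement passes, on the structural mirror
def replRN : List Char → List Char := repl ['\\', 'r', '\\', 'n'] ['\r', '\n']
def replLN : List Char → List Char := repl ['\\', 'n'] ['\n']
def replT : List Char → List Char := repl ['\\', 't'] ['\t']
def replN : List Char → List Char := repl ['\\', 'n'] pvPH
def replPH : List Char → List Char := repl pvPH ['\\', 'n']
def chainBL (s : List Char) : List Char := replT (replLN (replRN s))
def chainAL (s : List Char) : List Char := replPH (chainBL s)
def toInterA (p : Bool × List Char) : List Char := if p.1 then replN p.2 else p.2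
def transfB (p : Bool × List Char) : List Char := if p.1 then replT p.2 else chainBL p.2

lemma no_ln_in_replN (s : List Char) : ∀ j, ¬ (['\\', 'n'] : List Char) <+: (replN s).drop j :=
  not_prefix_repl _ _ (by simp) (by simp [pvPH])
    (by
      intro c hc
      simp only [pvPH] at hc
      fin_cases hc <;> decide) s

lemma replLN_replN (s : List Char) : replLN (replN s) = replN s :=
  repl_not_occ _ _ _ (no_ln_in_replN s)

lemma replRN_replN (s : List Char) : replRN (replN s) = replN s := by
  refine repl_not_occ _ _ _ (fun j hp => ?_)
  obtain ⟨r, hr⟩ := hp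
  refine no_ln_in_replN s (j + 2) ?_
  have : (replN s).drop (j + 2) = List.drop 2 ((replN s).drop j) := by
    rw [List.drop_drop]
  rw [this, ← hr]
  exact ⟨r, by simp⟩

lemma replN_cons {c : Char} (t : List Char) (h : c ≠ '\\') :
    replN (c :: t) = c :: replN t := by
  unfold replN
  exact repl_cons_of_head_ne _ _ _ _ _ h

lemma replT_cons {c : Char} (t : List Char) (h : c ≠ '\\') :
    replT (c :: t) = c :: replT t := by
  unfold replT
  exact repl_cons_of_head_ne _ _ _ _ _ h

lemma replPH_cons {c : Char} (t : List Char) (h : c ≠ '\x00') :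
    replPH (c :: t) = c :: replPH t := by
  unfold replPH pvPH
  exact repl_cons_of_head_ne _ _ _ _ _ h

lemma replN_cons_neg (c : Char) (t : List Char) (h : ¬ (['\\', 'n'] : List Char) <+: (c :: t)) :
    replN (c :: t) = c :: replN t := by
  unfold replN
  exact repl_cons_neg _ _ _ _ h

lemma replT_cons_neg (c : Char) (t : List Char) (h : ¬ (['\\', 't'] : List Char) <+: (c :: t)) :
    replT (c :: t) = c :: replT t := by
  unfold replT
  exact repl_cons_neg _ _ _ _ h

lemma replN_esc (t : List Char) : replN ('\\' :: 'n' :: t) = pvPH ++ replN t := by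
  unfold replN
  exact repl_prefix _ _ _ (by simp)

lemma replT_esc (t : List Char) : replT ('\\' :: 't' :: t) = '\t' :: replT t := by
  unfold replT
  simpa using repl_prefix ['\\', 't'] ['\t'] t (by simp)

lemma replPH_ph (X : List Char) : replPH (pvPH ++ X) = '\\' :: 'n' :: replPH X := by
  unfold replPH
  simpa using repl_prefix pvPH ['\\', 'n'] X (by simp [pvPH])

lemma pvPH_getLast : pvPH.getLast? = some '\x00' := by decide

lemma replT_PH_append (X : List Char) : replT (pvPH ++ X) = pvPH ++ replT X := by
  unfold replT
  rw [repl_append_last _ _ (by simp) _ _ ?_]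
  · rw [repl_not_mem _ _ pvPH '\\' (by simp) (by decide)]
  · intro ch hch
    rw [pvPH_getLast] at hch
    simp only [Option.some.injEq] at hch
    subst hch
    decide

lemma roundtrip (s : List Char) : '\x00' ∉ s → replPH (replT (replN s)) = replT s := by
  induction s using repl.induct ['\\', 'n'] with
  | case1 => intro _; simp [replPH, replT, replN, repl_nil]
  | case2 c t h ih =>
    intro hs
    have hpa : (['\\', 'n'] : List Char) <+: (c :: t) := List.isPrefixOf_iff_prefix.mp h.2
    obtain ⟨hc, hpt⟩ := List.cons_prefix_cons.mp hpa
    cases t with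
    | nil => simp [List.prefix_nil] at hpt
    | cons d t' =>
      obtain ⟨hd, -⟩ := List.cons_prefix_cons.mp hpt
      subst hc
      subst hd
      have ihx := ih (by
        intro hx
        exact hs (List.mem_cons_of_mem _ (List.mem_cons_of_mem _ (by simpa using hx))))
      rw [replN_esc, replT_PH_append, replPH_ph]
      rw [show List.drop (['\\', 'n'] : List Char).length ('\\' :: 'n' :: t') = t' from rfl] at ihx
      rw [ihx]
      rw [replT_cons_neg '\\' ('n' :: t') (by
        intro hp
        obtain ⟨-, hpt2⟩ := List.cons_prefix_cons.mp hp
        obtain ⟨hx, -⟩ := List.cons_prefix_cons.mp hpt2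
        exact absurd hx (by decide))]
      rw [replT_cons (t := t') (by decide)]
  | case3 c t h ih =>
    intro hs
    have hs' : '\x00' ∉ t := fun hx => hs (List.mem_cons_of_mem _ hx)
    have hnp : ¬ (['\\', 'n'] : List Char) <+: (c :: t) :=
      fun hp => h ⟨by simp, List.isPrefixOf_iff_prefix.mpr hp⟩
    have h1 : replN (c :: t) = c :: replN t := replN_cons_neg c t hnp
    by_cases hbt : c = '\\' ∧ t.head? = some 't'
    · obtain ⟨hc, hth⟩ := hbt
      cases t with
      | nil => simp at hth
      | cons d t' =>
        simp only [List.head?_cons, Option.some.injEq] at hth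
        subst hc
        subst hth
        have hN : replN ('t' :: t') = 't' :: replN t' := replN_cons t' (by decide)
        have hiht := ih hs'
        rw [hN, replT_cons (t := replN t') (by decide), replPH_cons (t := replT (replN t')) (by decide),
          replT_cons (t := t') (by decide)] at hiht
        simp only [List.cons.injEq, true_and] at hiht
        rw [h1, hN]
        rw [show ('\\' :: 't' :: replN t') = '\\' :: ('t' :: replN t') from rfl] at *
        rw [replT_esc, replPH_cons (t := replT (replN t')) (by decide), hiht, replT_esc]
    · have hc0 : c ≠ '\x00' := fun hx => hs (hx ▸ List.mem_cons_self)
      have hTn : ¬ (['\\', 't'] : List Char) <+: (c :: replN t) := by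
        intro hp
        obtain ⟨hcc, hpt⟩ := List.cons_prefix_cons.mp hp
        cases t with
        | nil => rw [show replN [] = [] from by unfold replN; exact repl_nil _ _] at hpt; simp [List.prefix_nil] at hpt
        | cons d t' =>
          by_cases hdp : (['\\', 'n'] : List Char) <+: (d :: t')
          · obtain ⟨hd2, hpt2⟩ := List.cons_prefix_cons.mp hdp
            subst hd2
            cases t' with
            | nil => simp [List.prefix_nil] at hpt2
            | cons e t'' =>
              obtain ⟨he, -⟩ := List.cons_prefix_cons.mp hpt2
              subst he
              rw [replN_esc] at hpt
              simp only [pvPH, List.cons_append] at hpt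
              obtain ⟨hx, -⟩ := List.cons_prefix_cons.mp hpt
              exact absurd hx (by decide)
          · rw [replN_cons_neg _ _ hdp] at hpt
            obtain ⟨hx, -⟩ := List.cons_prefix_cons.mp hpt
            subst hx
            exact hbt ⟨hcc.symm, rfl⟩
      have hTs : ¬ (['\\', 't'] : List Char) <+: (c :: t) := by
        intro hp
        obtain ⟨hcc, hpt⟩ := List.cons_prefix_cons.mp hp
        cases t with
        | nil => simp [List.prefix_nil] at hpt
        | cons d t' =>
          obtain ⟨hx, -⟩ := List.cons_prefix_cons.mp hpt
          subst hx
          exact hbt ⟨hcc.symm, rfl⟩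
      rw [h1, replT_cons_neg _ _ hTn, replPH_cons (t := replT (replN t)) hc0, ih hs',
        replT_cons_neg _ _ hTs]

lemma chainAL_nil : chainAL [] = [] := by
  simp [chainAL, chainBL, replRN, replLN, replT, replPH, repl_nil]

lemma nul_not_mem_chainBL (s : List Char) (hs : '\x00' ∉ s) : '\x00' ∉ chainBL s := by
  intro hx
  unfold chainBL replT replLN replRN at hx
  rcases mem_repl _ _ _ _ hx with h1 | h1
  · rcases mem_repl _ _ _ _ h1 with h2 | h2
    · rcases mem_repl _ _ _ _ h2 with h3 | h3
      · exact hs h3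
      · simp at h3
    · simp at h2
  · simp at h1

lemma chainAL_code (s : List Char) (hs : '\x00' ∉ s) : chainAL s = chainBL s := by
  unfold chainAL replPH
  exact repl_not_mem _ _ _ '\x00' (by simp [pvPH]) (nul_not_mem_chainBL s hs)

lemma chainAL_str (s : List Char) (hs : '\x00' ∉ s) : chainAL (replN s) = replT s := by
  unfold chainAL chainBL
  rw [show replRN (replN s) = replN s from replRN_replN s,
      show replLN (replN s) = replN s from replLN_replN s]
  exact roundtrip s hs

lemma repl_append_qcons (old new : List Char) (hold : old ≠ []) (X Y : List Char) (q : Char)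
    (hq : q ∉ old) :
    repl old new (X ++ q :: Y) = repl old new X ++ q :: repl old new Y := by
  rw [repl_append_head old new hold X (q :: Y)
    (by intro ch hch; simp only [List.head?_cons, Option.some.injEq] at hch; exact hch ▸ hq)]
  rw [repl_cons_not_mem _ _ _ _ hq]

lemma chainAL_append_qcons (X Y : List Char) (q : Char) (hq : q = '"' ∨ q = '\'') :
    chainAL (X ++ q :: Y) = chainAL X ++ q :: chainAL Y := by
  have h1 : q ∉ (['\\', 'r', '\\', 'n'] : List Char) := by rcases hq with rfl | rfl <;> decide
  have h2 : q ∉ (['\\', 'n'] : List Char) := by rcases hq with rfl | rfl <;> decide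
  have h3 : q ∉ (['\\', 't'] : List Char) := by rcases hq with rfl | rfl <;> decide
  have h4 : q ∉ pvPH := by rcases hq with rfl | rfl <;> decide
  unfold chainAL chainBL replRN replLN replT replPH
  rw [repl_append_qcons _ _ (by simp) _ _ _ h1, repl_append_qcons _ _ (by simp) _ _ _ h2,
      repl_append_qcons _ _ (by simp) _ _ _ h3, repl_append_qcons _ _ (by simp [pvPH]) _ _ _ h4]

lemma chainAL_append_getLast (X F : List Char) (q : Char) (hl : X.getLast? = some q)
    (hq : q = '"' ∨ q = '\'') :
    chainAL (X ++ F) = chainAL X ++ chainAL F := by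
  obtain ⟨X', rfl⟩ := List.getLast?_eq_some_iff.mp hl
  rw [List.append_assoc, List.singleton_append, chainAL_append_qcons X' F q hq,
      chainAL_append_qcons X' [] q hq, chainAL_nil]
  simp

lemma chainAL_append_head (X F : List Char) (q : Char) (hh : F.head? = some q)
    (hq : q = '"' ∨ q = '\'') :
    chainAL (X ++ F) = chainAL X ++ chainAL F := by
  cases F with
  | nil => simp at hh
  | cons f F' =>
    simp only [List.head?_cons, Option.some.injEq] at hh
    subst hh
    rw [chainAL_append_qcons X F' f hq]
    rw [show chainAL (f :: F') = f :: chainAL F' from by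
      simpa [chainAL_nil] using chainAL_append_qcons [] F' f hq]

def QuoteShape (sc : List Char) : Prop :=
  sc = ['"'] ∨ sc = ['\''] ∨ sc = ['"', '"', '"'] ∨ sc = ['\'', '\'', '\'']

lemma scanB_shape : ∀ l (ins : Bool) sc buf, ∃ x r, scanB l ins sc buf = (ins, buf ++ x) :: r := by
  intro l ins sc buf
  induction l, ins, sc, buf using scanB.induct with
  | case1 ins sc buf => exact ⟨[], [], by rw [scanB]; simp⟩
  | case2 c t sc buf h2 ih =>
    exact ⟨(c :: t).take 3, _, by rw [scanB, if_pos rfl, if_pos h2]⟩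
  | case3 c t sc buf h2 h3 ih =>
    exact ⟨[c], _, by rw [scanB, if_pos rfl, if_neg h2, if_pos h3]⟩
  | case4 c t sc buf h2 h3 ih =>
    obtain ⟨x, r, hx⟩ := ih
    exact ⟨[c] ++ x, r, by rw [scanB, if_pos rfl, if_neg h2, if_neg h3, hx]; simp⟩
  | case5 c t ins sc buf h1 h2 ih =>
    obtain ⟨x, r, hx⟩ := ih
    exact ⟨['\\', 'n'] ++ x, r, by rw [scanB, if_neg h1, if_pos h2, hx]; simp⟩
  | case6 c t ins sc buf h1 h2 h3 ih =>
    have hins : ins = true := by revert h1; cases ins <;> simp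
    subst hins
    exact ⟨[], scanB ((c :: t).drop sc.length) false sc sc, by rw [scanB, if_neg h1, if_neg h2, dif_pos h3]; simp⟩
  | case7 c t ins sc buf h1 h2 h3 ih =>
    obtain ⟨x, r, hx⟩ := ih
    exact ⟨[c] ++ x, r, by rw [scanB, if_neg h1, if_neg h2, dif_neg h3, hx]; simp⟩

lemma toInterA_false (x : List Char) : toInterA (false, x) = x := rfl
lemma toInterA_true (x : List Char) : toInterA (true, x) = replN x := rfl
lemma transfB_false (x : List Char) : transfB (false, x) = chainBL x := rfl
lemma transfB_true (x : List Char) : transfB (true, x) = replT x := rfl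
lemma replN_nil : replN [] = [] := by unfold replN; exact repl_nil _ _

lemma replN_singleton (c : Char) : replN [c] = [c] := by
  unfold replN
  rw [repl_cons_neg _ _ _ _ (fun hp => by have := hp.length_le; simp at this), repl_nil]

lemma scanA_open3 (c : Char) (t sc : List Char)
    (h : (c :: t).take 3 = ['"', '"', '"'] ∨ (c :: t).take 3 = ['\'', '\'', '\'']) :
    scanA (c :: t) false sc = (c :: t).take 3 :: scanA ((c :: t).drop 3) true ((c :: t).take 3) := by
  have hlen : 2 < (c :: t).length := by
    rcases h with h | h <;>
      (have h9 := congrArg List.length h;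
       simp only [List.length_take, List.length_cons, List.length_nil] at h9;
       simp only [List.length_cons]; omega)
  rw [scanA, if_neg (by simp), if_pos rfl, if_pos ⟨hlen, h⟩]

lemma scanA_open1 (c : Char) (t sc : List Char)
    (h3 : ¬ ((c :: t).take 3 = ['"', '"', '"'] ∨ (c :: t).take 3 = ['\'', '\'', '\'']))
    (h1 : c = '"' ∨ c = '\'') :
    scanA (c :: t) false sc = [c] :: scanA t true [c] := by
  rw [scanA, if_neg (by simp), if_pos rfl, if_neg (fun hh => h3 hh.2), if_pos h1]

lemma scanA_code (c : Char) (t sc : List Char)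
    (h3 : ¬ ((c :: t).take 3 = ['"', '"', '"'] ∨ (c :: t).take 3 = ['\'', '\'', '\'']))
    (h1 : ¬ (c = '"' ∨ c = '\'')) :
    scanA (c :: t) false sc = [c] :: scanA t false sc := by
  rw [scanA, if_neg (by simp), if_pos rfl, if_neg (fun hh => h3 hh.2), if_neg h1]

lemma scanA_esc (c : Char) (t sc : List Char)
    (h : c = '\\' ∧ t ≠ [] ∧ t[0]? = some 'n') :
    scanA (c :: t) true sc = pvPH :: scanA t.tail true sc := by
  rw [scanA, if_pos ⟨h.2.1, h.1, rfl, h.2.2⟩]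

lemma scanA_close (c : Char) (t sc : List Char) (hsc : QuoteShape sc)
    (hesc : ¬ (c = '\\' ∧ t ≠ [] ∧ t[0]? = some 'n'))
    (hcl : (c :: t).take sc.length = sc) :
    scanA (c :: t) true sc = sc :: scanA ((c :: t).drop sc.length) false sc := by
  have hescA : ¬ (t ≠ [] ∧ c = '\\' ∧ (true = true ∧ t[0]? = some 'n')) :=
    fun ⟨ht, hc, _, h0⟩ => hesc ⟨hc, ht, h0⟩
  rcases hsc with rfl | rfl | rfl | rfl
  · have hc : c = '"' := by simpa using hcl
    rw [scanA, if_neg hescA, if_neg (by simp), if_neg (by simp), if_pos ⟨by simp, by simpa using hcl⟩]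
    simp [hc]
  · have hc : c = '\'' := by simpa using hcl
    rw [scanA, if_neg hescA, if_neg (by simp), if_neg (by simp), if_pos ⟨by simp, by simpa using hcl⟩]
    simp [hc]
  · rw [scanA, if_neg hescA, if_neg (by simp), if_pos ⟨by simp, by simp⟩, if_pos (by simpa using hcl)]
    rfl
  · rw [scanA, if_neg hescA, if_neg (by simp), if_pos ⟨by simp, by simp⟩, if_pos (by simpa using hcl)]
    rfl

lemma scanA_instr (c : Char) (t sc : List Char) (hsc : QuoteShape sc)
    (hesc : ¬ (c = '\\' ∧ t ≠ [] ∧ t[0]? = some 'n'))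
    (hncl : (c :: t).take sc.length ≠ sc) :
    scanA (c :: t) true sc = [c] :: scanA t true sc := by
  have hescA : ¬ (t ≠ [] ∧ c = '\\' ∧ (true = true ∧ t[0]? = some 'n')) :=
    fun ⟨ht, hc, _, h0⟩ => hesc ⟨hc, ht, h0⟩
  rcases hsc with rfl | rfl | rfl | rfl
  · rw [scanA, if_neg hescA, if_neg (by simp), if_neg (by simp),
      if_neg (fun hh => hncl (by simpa using hh.2))]
  · rw [scanA, if_neg hescA, if_neg (by simp), if_neg (by simp),
      if_neg (fun hh => hncl (by simpa using hh.2))]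
  · rw [scanA, if_neg hescA, if_neg (by simp), if_pos ⟨by simp, by simp⟩,
      if_neg (by simpa using hncl)]
  · rw [scanA, if_neg hescA, if_neg (by simp), if_pos ⟨by simp, by simp⟩,
      if_neg (by simpa using hncl)]

lemma scan_rel : ∀ (l : List Char) (ins : Bool) (sc buf : List Char),
    (ins = true → QuoteShape sc) →
    (ins = true → buf.getLast? = some '\\' → l[0]? ≠ some 'n') →
    ((scanB l ins sc buf).map toInterA).flatten
      = (if ins then replN buf else buf) ++ (scanA l ins sc).flatten := by
  intro l ins sc buf
  induction l, ins, sc, buf using scanB.induct with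
  | case1 ins sc buf =>
    intro _ _
    rw [scanB, scanA]
    cases ins <;> simp [toInterA]
  | case2 c t sc buf h2 ih =>
    intro _ _
    have hq : QuoteShape ((c :: t).take 3) := by
      rcases h2 with h | h
      · exact Or.inr (Or.inr (Or.inl h))
      · exact Or.inr (Or.inr (Or.inr h))
    have ihx := ih (fun _ => hq) (by intro _ hg; simp at hg)
    rw [scanB, if_pos rfl, if_pos h2, scanA_open3 c t sc h2]
    simp only [List.map_cons, List.flatten_cons, toInterA_false, ihx, if_true, replN_nil]
    simp
  | case3 c t sc buf h2 h3 ih =>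
    intro _ _
    have hq : QuoteShape [c] := by
      rcases h3 with rfl | rfl
      · exact Or.inl rfl
      · exact Or.inr (Or.inl rfl)
    have ihx := ih (fun _ => hq) (by intro _ hg; simp at hg)
    rw [scanB, if_pos rfl, if_neg h2, if_pos h3, scanA_open1 c t sc h2 h3]
    simp only [List.map_cons, List.flatten_cons, toInterA_false, ihx, if_true, replN_nil]
    simp
  | case4 c t sc buf h2 h3 ih =>
    intro _ _
    have ihx := ih (by simp) (by simp)
    rw [scanB, if_pos rfl, if_neg h2, if_neg h3, scanA_code c t sc h2 h3, ihx]
    simp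
  | case5 c t ins sc buf h1 h2 ih =>
    have hins : ins = true := by revert h1; cases ins <;> simp
    subst hins
    intro hsc hesc
    have ihx := ih (fun _ => hsc rfl) (by
      intro _ hg
      rw [List.getLast?_append] at hg
      simp at hg)
    have hN : replN (buf ++ ['\\', 'n']) = replN buf ++ pvPH := by
      unfold replN
      rw [repl_append_pair '\\' 'n' pvPH buf ['\\', 'n'] (by rintro ⟨-, hh⟩; simp at hh)]
      congr 1
      have := replN_esc []
      rw [replN_nil] at this
      simpa [replN] using this
    rw [scanB, if_neg h1, if_pos h2, scanA_esc c t sc h2, ihx]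
    simp only [if_true, hN, List.flatten_cons]
    simp
  | case6 c t ins sc buf h1 h2 h3 ih =>
    have hins : ins = true := by revert h1; cases ins <;> simp
    subst hins
    intro hsc _
    have ihx := ih (by simp) (by simp)
    rw [scanB, if_neg h1, if_neg h2, dif_pos h3, scanA_close c t sc (hsc rfl) h2 h3.2]
    simp only [List.map_cons, List.flatten_cons, toInterA_true, ihx, if_true, if_false]
    simp
  | case7 c t ins sc buf h1 h2 h3 ih =>
    have hins : ins = true := by revert h1; cases ins <;> simp
    subst hins
    intro hsc hesc
    have hncl : (c :: t).take sc.length ≠ sc := by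
      intro hh
      apply h3
      refine ⟨?_, hh⟩
      rcases hsc rfl with rfl | rfl | rfl | rfl <;> simp
    have ihx := ih (fun _ => hsc rfl) (by
      intro _ hg
      rw [List.getLast?_concat] at hg
      simp only [Option.some.injEq] at hg
      subst hg
      intro h0
      cases t with
      | nil => simp at h0
      | cons d t' => exact h2 ⟨rfl, by simp, h0⟩)
    have hN : replN (buf ++ [c]) = replN buf ++ [c] := by
      unfold replN
      rw [repl_append_pair '\\' 'n' pvPH buf [c] (by
        rintro ⟨hg, hh⟩
        simp only [List.head?_cons, Option.some.injEq] at hh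
        subst hh
        exact hesc rfl hg (by simp))]
      congr 1
      simpa [replN] using replN_singleton c
    rw [scanB, if_neg h1, if_neg h2, dif_neg h3, scanA_instr c t sc (hsc rfl) h2 hncl, ihx]
    simp only [if_true, hN, List.flatten_cons]
    simp

lemma chain_rel : ∀ (l : List Char) (ins : Bool) (sc buf : List Char),
    (ins = true → QuoteShape sc) →
    '\x00' ∉ l → '\x00' ∉ buf →
    chainAL (((scanB l ins sc buf).map toInterA).flatten)
      = ((scanB l ins sc buf).map transfB).flatten := by
  intro l ins sc buf
  induction l, ins, sc, buf using scanB.induct with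
  | case1 ins sc buf =>
    intro hsc _ hbuf
    rw [scanB]
    cases ins
    · simp only [List.map_cons, List.map_nil, List.flatten_cons, List.flatten_nil,
        toInterA_false, transfB_false, List.append_nil]
      exact chainAL_code buf hbuf
    · simp only [List.map_cons, List.map_nil, List.flatten_cons, List.flatten_nil,
        toInterA_true, transfB_true, List.append_nil]
      exact chainAL_str buf hbuf
  | case2 c t sc buf h2 ih =>
    intro _ hl hbuf
    have hl' : '\x00' ∉ (c :: t).drop 3 := fun hx => hl (List.drop_subset _ _ hx)
    have hq : QuoteShape ((c :: t).take 3) := by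
      rcases h2 with h | h
      · exact Or.inr (Or.inr (Or.inl h))
      · exact Or.inr (Or.inr (Or.inr h))
    have ihx := ih (fun _ => hq) hl' (by simp)
    rw [scanB, if_pos rfl, if_pos h2]
    simp only [List.map_cons, List.flatten_cons, toInterA_false, transfB_false]
    have hbq : '\x00' ∉ buf ++ (c :: t).take 3 := by
      intro hx
      rcases List.mem_append.mp hx with hx | hx
      · exact hbuf hx
      · rcases h2 with h | h <;> (rw [h] at hx; simp at hx)
    rcases h2 with h | h <;>
      (rw [h]
       rw [chainAL_append_getLast _ _ _ (by rw [List.getLast?_append]; rfl)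
             (by first | exact Or.inl rfl | exact Or.inr rfl)]
       rw [chainAL_code _ (by rw [h] at hbq; exact hbq)]
       rw [h] at ihx
       rw [ihx])
  | case3 c t sc buf h2 h3 ih =>
    intro _ hl hbuf
    have hl' : '\x00' ∉ t := fun hx => hl (List.mem_cons_of_mem _ hx)
    have hq : QuoteShape [c] := by
      rcases h3 with rfl | rfl
      · exact Or.inl rfl
      · exact Or.inr (Or.inl rfl)
    have ihx := ih (fun _ => hq) hl' (by simp)
    rw [scanB, if_pos rfl, if_neg h2, if_pos h3]
    simp only [List.map_cons, List.flatten_cons, toInterA_false, transfB_false]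
    have hbq : '\x00' ∉ buf ++ [c] := by
      intro hx
      rcases List.mem_append.mp hx with hx | hx
      · exact hbuf hx
      · rcases h3 with rfl | rfl <;> simp at hx
    rw [chainAL_append_getLast _ _ c List.getLast?_concat h3]
    rw [chainAL_code _ hbq, ihx]
  | case4 c t sc buf h2 h3 ih =>
    intro _ hl hbuf
    have hl' : '\x00' ∉ t := fun hx => hl (List.mem_cons_of_mem _ hx)
    have hbq : '\x00' ∉ buf ++ [c] := by
      intro hx
      rcases List.mem_append.mp hx with hx | hx
      · exact hbuf hx
      · simp only [List.mem_singleton] at hx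
        exact hl (hx ▸ List.mem_cons_self)
    rw [scanB, if_pos rfl, if_neg h2, if_neg h3]
    exact ih (by simp) hl' hbq
  | case5 c t ins sc buf h1 h2 ih =>
    have hins : ins = true := by revert h1; cases ins <;> simp
    subst hins
    intro hsc hl hbuf
    have hl' : '\x00' ∉ t.tail := by
      intro hx
      rw [← List.drop_one] at hx
      exact hl (List.mem_cons_of_mem _ (List.mem_of_mem_drop hx))
    have hbq : '\x00' ∉ buf ++ ['\\', 'n'] := by
      intro hx
      rcases List.mem_append.mp hx with hx | hx
      · exact hbuf hx
      · simp at hx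
    rw [scanB, if_neg h1, if_pos h2]
    exact ih (fun _ => hsc rfl) hl' hbq
  | case6 c t ins sc buf h1 h2 h3 ih =>
    have hins : ins = true := by revert h1; cases ins <;> simp
    subst hins
    intro hsc hl hbuf
    have hl' : '\x00' ∉ (c :: t).drop sc.length := fun hx => hl (List.drop_subset _ _ hx)
    have hscq : '\x00' ∉ sc := by
      rcases hsc rfl with rfl | rfl | rfl | rfl <;> simp
    have ihx := ih (by simp) hl' hscq
    rw [scanB, if_neg h1, if_neg h2, dif_pos h3]
    simp only [List.map_cons, List.flatten_cons, toInterA_true, transfB_true]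
    obtain ⟨x, r, hxr⟩ := scanB_shape ((c :: t).drop sc.length) false sc sc
    rcases hsc rfl with rfl | rfl | rfl | rfl
    · rw [chainAL_append_head _ _ '"' (by rw [hxr]; simp [toInterA]) (Or.inl rfl),
        chainAL_str buf hbuf, ihx]
    · rw [chainAL_append_head _ _ '\'' (by rw [hxr]; simp [toInterA]) (Or.inr rfl),
        chainAL_str buf hbuf, ihx]
    · rw [chainAL_append_head _ _ '"' (by rw [hxr]; simp [toInterA]) (Or.inl rfl),
        chainAL_str buf hbuf, ihx]
    · rw [chainAL_append_head _ _ '\'' (by rw [hxr]; simp [toInterA]) (Or.inr rfl),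
        chainAL_str buf hbuf, ihx]
  | case7 c t ins sc buf h1 h2 h3 ih =>
    have hins : ins = true := by revert h1; cases ins <;> simp
    subst hins
    intro hsc hl hbuf
    have hl' : '\x00' ∉ t := fun hx => hl (List.mem_cons_of_mem _ hx)
    have hbq : '\x00' ∉ buf ++ [c] := by
      intro hx
      rcases List.mem_append.mp hx with hx | hx
      · exact hbuf hx
      · simp only [List.mem_singleton] at hx
        exact hl (hx ▸ List.mem_cons_self)
    rw [scanB, if_neg h1, if_neg h2, dif_neg h3]
    exact ih (fun _ => hsc rfl) hl' hbq

lemma join_nil_flatten (ps : List (List Char)) : PySem.Chars.join [] ps = ps.flatten := by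
  simp only [PySem.Chars.join, List.intercalate]
  induction ps with
  | nil => rfl
  | cons a t ih =>
    cases t with
    | nil => simp
    | cons b t' => simpa [List.intersperse] using ih

lemma dom_no_nul (code : String) (h : Dom_smart_unescape_code_py code) :
    '\x00' ∉ code.toList := by
  intro hx
  have hall := List.all_eq_true.mp h _ hx
  exact absurd hall (by decide)

theorem smart_unescape_code_py_spec : Claim_equal_smart_unescape_code_py := by
  intro code hdom
  unfold Spec_smart_unescape_code_py smart_unescape_code_py smart_unescape_code_py_alt
  by_cases h1 : PySem.Chars.isIn ['\\', 'n'] code.toList = true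
  · by_cases h2 : PySem.Chars.isIn ['\n'] code.toList = true
    · rw [if_neg (by simp [h1]), if_pos h2, if_pos (Or.inr h2)]
    · rw [if_neg (by simp [h1]), if_neg h2, if_neg (by simp [h1, h2])]
      congr 1
      rw [join_nil_flatten]
      rw [replace_eq_repl _ _ _ (by simp [pvPH]), replace_eq_repl _ _ _ (by simp [pvPH]),
          replace_eq_repl _ _ _ (by simp [pvPH]), replace_eq_repl _ _ _ (by simp [pvPH])]
      have hA : repl pvPH ['\\', 'n']
          (repl ['\\', 't'] ['\t']
            (repl ['\\', 'n'] ['\n']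
              (repl ['\\', 'r', '\\', 'n'] ['\r', '\n'] (scanA code.toList false []).flatten)))
          = chainAL ((scanA code.toList false []).flatten) := rfl
      rw [hA]
      have hS := scan_rel code.toList false [] [] (by simp) (by simp)
      simp only [if_neg (Bool.false_ne_true)] at hS
      rw [show ((scanA code.toList false []).flatten)
            = ((scanB code.toList false [] []).map toInterA).flatten from by
          rw [hS]; simp]
      rw [chain_rel code.toList false [] [] (by simp) (dom_no_nul code hdom) (by simp)]
      congr 1
      have hfun : (fun p : Bool × List Char =>
          if p.1 then PySem.Chars.replace p.2 ['\\', 't'] ['\t'] else chain3 p.2) = transfB := by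
        funext p
        obtain ⟨b, x⟩ := p
        cases b
        · simp only [Bool.false_eq_true, if_false, transfB_false, chain3]
          rw [replace_eq_repl _ _ _ (by simp), replace_eq_repl _ _ _ (by simp),
              replace_eq_repl _ _ _ (by simp)]
          rfl
        · simp only [if_true, transfB_true]
          rw [replace_eq_repl _ _ _ (by simp)]
          rfl
      rw [hfun]
  · rw [if_pos (by simp [h1]), if_pos (Or.inl (by simp [h1]))]
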